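-- pv_equiv track=rewrite | github.com/gurjy0t/advent-of-code-2021 | Day03/puzzle2.py | get_most_at
-- ===== SOURCE A (Python) =====
-- def get_most_at(nums, pos):
--     seen0, seen1 = 0, 0
--     zeros, ones = [], []
--
--     i=0
--     while(i<len(nums)):
--         if nums[i][pos]=='0':
--             zeros.append(nums[i])
--             seen0+=1
--         else:
--             ones.append(nums[i])
--             seen1+=1
--         i+=1
--
--     if seen0 > seen1:
--         return zeros
--     else:
--         return ones
-- ===== SOURCE B (Python) =====
-- def get_most_at(nums, pos):
--     count_zero = sum(1 for x in nums if x[pos] == '0')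
--     bit_is_zero = count_zero > len(nums) - count_zero
--     return [x for x in nums if (x[pos] == '0') == bit_is_zero]
-- ===== Notes on version B (the rewrite author's own statement) =====
-- stated objective: simpler
-- what changed: Replaces the simultaneous two-list partition (index-driven while loop maintaining both zeros and ones lists plus two counters) with a counting pass that decides the winning bit, followed by a single filtering pass.
import Mathlib
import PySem

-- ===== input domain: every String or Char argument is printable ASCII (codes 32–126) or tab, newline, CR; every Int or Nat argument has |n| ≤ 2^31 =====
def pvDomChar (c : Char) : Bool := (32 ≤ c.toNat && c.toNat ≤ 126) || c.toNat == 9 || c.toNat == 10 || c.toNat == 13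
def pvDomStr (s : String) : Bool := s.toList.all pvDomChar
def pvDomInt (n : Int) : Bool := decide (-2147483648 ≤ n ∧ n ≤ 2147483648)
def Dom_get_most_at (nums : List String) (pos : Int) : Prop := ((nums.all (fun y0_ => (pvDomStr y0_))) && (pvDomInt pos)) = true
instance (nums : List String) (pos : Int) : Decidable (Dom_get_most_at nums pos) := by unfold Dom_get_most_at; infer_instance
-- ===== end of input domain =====

-- B replaces A's simultaneous two-list partition with a count pass deciding the winning bit followed by one filter pass (objective: simpler).


-- ===== PORT A =====
-- A's while loop over i walks nums in order, maintaining two counters and two lists;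
-- ported as a foldl over nums with the same 4-part state.
def get_most_at (nums : List String) (pos : Int) : List String :=
  let st := nums.foldl
    (fun (st : Int × Int × List String × List String) x =>
      let (seen0, seen1, zeros, ones) := st
      if PySem.Str.pyGet? x pos = some '0' then (seen0 + 1, seen1, zeros ++ [x], ones)
      else (seen0, seen1 + 1, zeros, ones ++ [x]))
    (0, 0, [], [])
  if st.1 > st.2.1 then st.2.2.1 else st.2.2.2

-- ===== PORT B =====
def get_most_at_alt (nums : List String) (pos : Int) : List String :=
  let count_zero : Int :=
    nums.foldl (fun acc x => if PySem.Str.pyGet? x pos = some '0' then acc + 1 else acc) 0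
  let bit_is_zero : Bool := decide (count_zero > (nums.length : Int) - count_zero)
  nums.filter (fun x => decide (PySem.Str.pyGet? x pos = some '0') == bit_is_zero)

-- ===== PRECONDITION & SPEC =====
-- Pre_ excludes exactly the inputs where Python A raises IndexError: some string in nums too short for index pos.
def Pre_get_most_at (nums : List String) (pos : Int) : Prop :=
  ∀ s ∈ nums, PySem.Raise.InRange s.toList.length pos
instance (nums : List String) (pos : Int) : Decidable (Pre_get_most_at nums pos) := by
  unfold Pre_get_most_at; infer_instance

def pvWitness_get_most_at : List String × Int := (["01", "10", "11"], 0)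

def Spec_get_most_at (nums : List String) (pos : Int) (out : List String) : Prop := out = get_most_at_alt nums pos
instance (nums : List String) (pos : Int) (out : List String) : Decidable (Spec_get_most_at nums pos out) := by unfold Spec_get_most_at; infer_instance

-- ===== CLAIM (what is proved, stated in full; the proofs are below) =====
def Claim_equal_get_most_at : Prop := ∀ (nums : List String) (pos : Int), Dom_get_most_at nums pos → Pre_get_most_at nums pos → Spec_get_most_at nums pos (get_most_at nums pos)

-- ===== LEMMAS AND PROOFS =====

-- characterisation of A's fold: counters count the two filters, lists are the two filters (appended to the seed)
theorem get_most_at_fold_eq (P : String → Prop) [DecidablePred P] (nums : List String)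
    (s0 s1 : Int) (zs os : List String) :
    nums.foldl
      (fun (st : Int × Int × List String × List String) x =>
        let (seen0, seen1, zeros, ones) := st
        if P x then (seen0 + 1, seen1, zeros ++ [x], ones)
        else (seen0, seen1 + 1, zeros, ones ++ [x]))
      (s0, s1, zs, os)
    = (s0 + ((nums.filter (fun x => decide (P x))).length : Int),
       s1 + ((nums.filter (fun x => !decide (P x))).length : Int),
       zs ++ nums.filter (fun x => decide (P x)),
       os ++ nums.filter (fun x => !decide (P x))) := by
  induction nums generalizing s0 s1 zs os with
  | nil => simp
  | cons x xs ih =>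
    simp only [List.foldl_cons, List.filter_cons]
    by_cases h : P x
    · rw [if_pos h, ih]
      simp [h, List.append_assoc, add_assoc, add_comm (1 : Int)]
    · rw [if_neg h, ih]
      simp [h, List.append_assoc, add_assoc, add_comm (1 : Int)]

-- B's counting fold equals the length of the zeros filter
theorem count_fold_eq (P : String → Prop) [DecidablePred P] (nums : List String) (a : Int) :
    nums.foldl (fun acc x => if P x then acc + 1 else acc) a
    = a + ((nums.filter (fun x => decide (P x))).length : Int) := by
  induction nums generalizing a with
  | nil => simp
  | cons x xs ih =>
    simp only [List.foldl_cons, List.filter_cons]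
    by_cases h : P x
    · rw [if_pos h, ih]; simp [h]; omega
    · rw [if_neg h, ih]; simp [h]

-- lengths of the two filters add up to the length of the list
theorem filter_length_add (P : String → Prop) [DecidablePred P] (nums : List String) :
    (nums.filter (fun x => decide (P x))).length
      + (nums.filter (fun x => !decide (P x))).length
    = nums.length := by
  induction nums with
  | nil => rfl
  | cons x xs ih =>
    by_cases h : P x <;> simp [h] <;> omega

-- ===== VERDICT (by name: the statement is the Claim_ definition above) =====
theorem get_most_at_spec : Claim_equal_get_most_at := by
  intro nums pos _ _
  unfold Spec_get_most_at get_most_at get_most_at_alt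
  rw [get_most_at_fold_eq (fun x => PySem.Str.pyGet? x pos = some '0'),
      count_fold_eq (fun x => PySem.Str.pyGet? x pos = some '0')]
  have hlen := filter_length_add (fun x => PySem.Str.pyGet? x pos = some '0') nums
  set Z := (nums.filter (fun x => decide (PySem.Str.pyGet? x pos = some '0'))).length with hZ
  set O := (nums.filter (fun x => !decide (PySem.Str.pyGet? x pos = some '0'))).length with hO
  by_cases hb : (0 : Int) + (Z : Int) > (nums.length : Int) - ((0 : Int) + (Z : Int))
  · have hb' : (0 : Int) + (Z : Int) > (0 : Int) + (O : Int) := by omega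
    rw [if_pos hb']
    have hd : ((nums.length : Int) - (Z : Int) < (Z : Int)) := by omega
    simp [hd]
  · have hb' : ¬ ((0 : Int) + (Z : Int) > (0 : Int) + (O : Int)) := by omega
    rw [if_neg hb']
    have hd : ¬ ((nums.length : Int) - (Z : Int) < (Z : Int)) := by omega
    simp [hd]
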